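-- pv_equiv track=rewrite | github.com/saaly182/AdventOfCode | 2015/d16/d16.py | part2
-- ===== SOURCE A (Python) =====
-- real_aunt_sue = {
--     ('children', 3),
--     ('cats', 7),
--     ('samoyeds', 2),
--     ('pomeranians', 3),
--     ('akitas', 0),
--     ('vizslas', 0),
--     ('goldfish', 5),
--     ('trees', 3),
--     ('cars', 2),
--     ('perfumes', 1),
-- }
--
-- def part2(aunts):
--     """
--     In particular, the cats and trees readings indicates that there are
--     greater than that many (due to the unpredictable nuclear decay of cat
--     dander and tree pollen), while the pomeranians and goldfish readings
--     indicate that there are fewer than that many (due to the modial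
--     interaction of magnetoreluctance).
--     """
--     rasd = {k: v for (k, v) in real_aunt_sue}
--     for aunt_num, things in aunts.items():
--         found_aunt = True
--         for thing, count in things:
--             if thing not in rasd:
--                 found_aunt = False
--             match thing:
--                 case ('cats' | 'trees') as gt_thing:
--                     if count <= rasd[gt_thing]:
--                         found_aunt = False
--                 case ('pomeranians' | 'goldfish') as lt_thing:
--                     if count >= rasd[lt_thing]:
--                         found_aunt = False
--                 case _ as eq_thing:
--                     if count != rasd[eq_thing]:
--                         found_aunt = False
--             if not found_aunt:
--                 break
--         if found_aunt:
--             return aunt_num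
--     return None
-- ===== SOURCE B (Python) =====
-- _READINGS = {'children': 3, 'cats': 7, 'samoyeds': 2, 'pomeranians': 3,
--              'akitas': 0, 'vizslas': 0, 'goldfish': 5, 'trees': 3,
--              'cars': 2, 'perfumes': 1}
--
-- def part2(aunts):
--     # Staged elimination: collect the property names the data mentions, then for
--     # each such property (looking its reading up in the MFCSAM table) filter out
--     # the aunts whose listed value contradicts it; the first surviving aunt
--     # (insertion order) is the answer.  The sweeps commute, so the set's
--     # iteration order does not affect the result.
--     candidates = list(aunts.items())
--     props_used = {t for _, things in aunts.items() for t, _ in things}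
--     for prop in props_used:
--         reading = _READINGS[prop]
--         if prop in ('cats', 'trees'):
--             passes = lambda c, r=reading: c > r
--         elif prop in ('pomeranians', 'goldfish'):
--             passes = lambda c, r=reading: c < r
--         else:
--             passes = lambda c, r=reading: c == r
--         candidates = [(num, things) for num, things in candidates
--                       if all(passes(c) for t, c in things if t == prop)]
--     return candidates[0][0] if candidates else None
-- ===== Notes on version B (the rewrite author's own statement) =====
-- stated objective: alternative
-- what changed: Inverts the loop nesting: instead of scanning each aunt's properties with a match/case and a found_aunt flag, B collects the property names the data uses and stage-wise filters the candidate aunt list per property, returning the first survivor.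
-- outside the precondition, e.g. on part2({1: [], 2: [('xyz', 0)]}): A returns 1, B raises KeyError
import Mathlib
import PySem

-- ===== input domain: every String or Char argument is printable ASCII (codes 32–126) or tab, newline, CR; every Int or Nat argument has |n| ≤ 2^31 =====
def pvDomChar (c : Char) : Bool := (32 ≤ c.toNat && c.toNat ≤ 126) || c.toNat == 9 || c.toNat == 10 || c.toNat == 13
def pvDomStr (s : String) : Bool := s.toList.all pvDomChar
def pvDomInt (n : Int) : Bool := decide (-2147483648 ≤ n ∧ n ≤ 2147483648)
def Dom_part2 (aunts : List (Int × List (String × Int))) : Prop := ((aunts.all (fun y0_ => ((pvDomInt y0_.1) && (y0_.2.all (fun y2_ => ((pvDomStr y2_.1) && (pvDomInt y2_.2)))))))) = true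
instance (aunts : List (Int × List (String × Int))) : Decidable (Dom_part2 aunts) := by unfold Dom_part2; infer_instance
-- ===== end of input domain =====

-- B inverts the loop nesting: instead of A's per-aunt match/case scan with a found_aunt
-- flag, B collects the property names the data uses and stage-wise filters the candidate
-- aunt list per property, returning the first survivor (alternative decomposition).

-- ===== PORT A =====
-- rasd = {k: v for (k, v) in real_aunt_sue} (set iteration order is irrelevant: keys distinct, only lookups used)
def rasdA : PySem.Dict String Int := PySem.Dict.mk
  [("children", 3), ("cats", 7), ("samoyeds", 2), ("pomeranians", 3), ("akitas", 0),
   ("vizslas", 0), ("goldfish", 5), ("trees", 3), ("cars", 2), ("perfumes", 1)]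

-- one iteration of A's inner loop body: the found_aunt value after this thing, none = KeyError
def stepA (thing : String) (count : Int) : Option Bool :=
  let f1 := if (rasdA.get? thing).isSome then true else false   -- "if thing not in rasd: found_aunt = False"
  if thing = "cats" ∨ thing = "trees" then
    match rasdA.get? thing with
    | some r => some (if count ≤ r then false else f1)
    | none => none
  else if thing = "pomeranians" ∨ thing = "goldfish" then
    match rasdA.get? thing with
    | some r => some (if count ≥ r then false else f1)
    | none => none
  else
    match rasdA.get? thing with
    | some r => some (if count ≠ r then false else f1)   -- rasd[eq_thing] raises on unknown thing
    | none => none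

-- A's inner loop with the "if not found_aunt: break" early exit
def checkA : List (String × Int) → Option Bool
  | [] => some true
  | (t, c) :: rest =>
    match stepA t c with
    | none => none
    | some f => if f then checkA rest else some false

-- A's outer loop over aunts.items()
def loopA : List (Int × List (String × Int)) → Option (Option Int)
  | [] => some none
  | (num, things) :: rest =>
    match checkA things with
    | none => none
    | some true => some (some num)
    | some false => loopA rest

def part2 (aunts : List (Int × List (String × Int))) : Option Int :=
  (loopA aunts).getD none   -- the `none` branch is the KeyError region, excluded by Pre_part2

-- ===== PORT B =====
def readingsB : List (String × Int) :=
  [("children", 3), ("cats", 7), ("samoyeds", 2), ("pomeranians", 3), ("akitas", 0),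
   ("vizslas", 0), ("goldfish", 5), ("trees", 3), ("cars", 2), ("perfumes", 1)]

def readDictB : PySem.Dict String Int := PySem.Dict.mk readingsB

-- the comparator chosen for one pass (the three-way if of Source B)
def passesB (prop : String) (reading c : Int) : Bool :=
  if prop = "cats" ∨ prop = "trees" then c > reading
  else if prop = "pomeranians" ∨ prop = "goldfish" then c < reading
  else c == reading

-- "all(passes(c) for t, c in things if t == prop)"
def auntOkB (prop : String) (reading : Int) (things : List (String × Int)) : Bool :=
  (things.filter (fun q => q.1 == prop)).all (fun q => passesB prop reading q.2)

-- props_used = {t for _, things in aunts.items() for t, _ in things}; the sweeps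
-- commute, so Python's set-iteration order cannot affect the result (proved below
-- via the order-insensitive filter form)
def usedPropsB (aunts : List (Int × List (String × Int))) : PySem.Set String :=
  PySem.Set.ofList (aunts.flatMap (fun a => a.2.map Prod.fst))

-- Source B's for-loop over props_used; none = KeyError from _READINGS[prop]
def loopB : List String → List (Int × List (String × Int)) →
    Option (List (Int × List (String × Int)))
  | [], cands => some cands
  | p :: rest, cands =>
    match readDictB.get? p with
    | none => none
    | some r => loopB rest (cands.filter (fun a => auntOkB p r a.2))

def part2_alt (aunts : List (Int × List (String × Int))) : Option Int :=
  match loopB (usedPropsB aunts) aunts with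
  | none => none        -- the KeyError region, excluded by Pre_part2
  | some [] => none
  | some (a :: _) => some a.1

-- ===== PRECONDITION & SPEC =====
def knownNames : List String :=
  ["children", "cats", "samoyeds", "pomeranians", "akitas",
   "vizslas", "goldfish", "trees", "cars", "perfumes"]

-- Pre_ excludes aunt lists mentioning a property name outside the ten MFCSAM readings:
-- on such inputs A raises KeyError (rasd[eq_thing]) as soon as such a thing is scanned
-- and B raises KeyError (_READINGS[prop]) for every unknown name; aunts listed after an
-- earlier match are never scanned by A, so Pre_ is narrower than A's raising region (see cites).
def Pre_part2 (aunts : List (Int × List (String × Int))) : Prop :=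
  ∀ p ∈ aunts, ∀ q ∈ p.2, q.1 ∈ knownNames
instance (aunts : List (Int × List (String × Int))) : Decidable (Pre_part2 aunts) := by
  unfold Pre_part2; infer_instance

def pvWitness_part2 : (List (Int × List (String × Int))) :=
  [(1, [("cats", 9), ("goldfish", 2)]), (2, [("akitas", 1)])]

def Spec_part2 (aunts : List (Int × List (String × Int))) (out : Option Int) : Prop := out = part2_alt aunts
instance (aunts : List (Int × List (String × Int))) (out : Option Int) : Decidable (Spec_part2 aunts out) := by unfold Spec_part2; infer_instance

-- ===== CLAIM (what is proved, stated in full; the proofs are below) =====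
def Claim_equal_part2 : Prop := ∀ (aunts : List (Int × List (String × Int))), Dom_part2 aunts → Pre_part2 aunts → Spec_part2 aunts (part2 aunts)

-- ===== LEMMAS AND PROOFS =====

-- the reading table as a total lookup (used only in proofs)
def rdVal (t : String) : Int := readDictB.getD t 0

-- an aunt survives a sweep for every known property iff this per-aunt predicate holds
def surviveB (things : List (String × Int)) : Bool :=
  things.all (fun q => passesB q.1 (rdVal q.1) q.2)

-- the order-insensitive canonical form both programs reduce to
def firstMatch (aunts : List (Int × List (String × Int))) : Option Int :=
  match aunts.filter (fun a => surviveB a.2) with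
  | [] => none
  | a :: _ => some a.1

lemma known_get (p : String) (h : p ∈ knownNames) :
    readDictB.get? p = some (rdVal p) := by
  simp only [knownNames, List.mem_cons, List.not_mem_nil, or_false] at h
  rcases h with rfl | rfl | rfl | rfl | rfl | rfl | rfl | rfl | rfl | rfl <;> rfl

-- for a known property name, one step of A equals the per-thing check
lemma stepA_eq (t : String) (c : Int) (h : t ∈ knownNames) :
    stepA t c = some (passesB t (rdVal t) c) := by
  simp only [knownNames, List.mem_cons, List.not_mem_nil, or_false] at h
  rcases h with rfl | rfl | rfl | rfl | rfl | rfl | rfl | rfl | rfl | rfl <;>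
    simp [stepA, passesB, rdVal, readDictB, readingsB, rasdA, PySem.Dict.get?,
          PySem.Dict.getD] <;>
    (first
      | rfl
      | (rw [Bool.eq_iff_iff]; constructor <;> intro h <;> omega)
      | (rw [Bool.eq_iff_iff]; simp only [decide_eq_true_eq, Bool.not_eq_true',
             decide_eq_false_iff_not, not_lt]))

lemma checkA_eq (things : List (String × Int)) (h : ∀ q ∈ things, q.1 ∈ knownNames) :
    checkA things = some (surviveB things) := by
  unfold surviveB
  induction things with
  | nil => rfl
  | cons q rest ih =>
    obtain ⟨t, c⟩ := q
    have ht : t ∈ knownNames := h (t, c) (by simp)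
    simp only [checkA, stepA_eq t c ht, List.all_cons]
    by_cases hb : passesB t (rdVal t) c = true
    · simp [hb, ih (fun q hq => h q (List.mem_cons_of_mem _ hq))]
    · simp only [Bool.not_eq_true] at hb
      simp [hb]

lemma loopA_eq (aunts : List (Int × List (String × Int))) (h : Pre_part2 aunts) :
    loopA aunts = some (firstMatch aunts) := by
  induction aunts with
  | nil => rfl
  | cons p rest ih =>
    obtain ⟨num, things⟩ := p
    have hth : ∀ q ∈ things, q.1 ∈ knownNames := h (num, things) (by simp)
    have hrest : Pre_part2 rest := fun p hp => h p (List.mem_cons_of_mem _ hp)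
    simp only [loopA, checkA_eq things hth, firstMatch, List.filter_cons]
    cases hb : surviveB things
    · simpa only [firstMatch, Bool.false_eq_true, if_false] using ih hrest
    · simp

-- Source B's staged filters collapse to one filter by the conjunction of all sweeps
lemma loopB_eq (props : List String) (cands : List (Int × List (String × Int)))
    (h : ∀ p ∈ props, p ∈ knownNames) :
    loopB props cands
      = some (cands.filter (fun a => props.all (fun p => auntOkB p (rdVal p) a.2))) := by
  induction props generalizing cands with
  | nil => simp [loopB]
  | cons p rest ih =>
    simp only [loopB, known_get p (h p (by simp))]
    rw [ih _ (fun q hq => h q (List.mem_cons_of_mem _ hq)), List.filter_filter]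
    simp only [List.all_cons]
    exact congrArg some (List.filter_congr (fun a _ => by rw [Bool.and_comm]))

-- per aunt: surviving every sweep over the names its own list uses = surviveB
lemma sweeps_eq_survive (props : List String) (things : List (String × Int))
    (hsub : ∀ q ∈ things, q.1 ∈ props) :
    props.all (fun p => auntOkB p (rdVal p) things) = surviveB things := by
  rw [Bool.eq_iff_iff]
  simp only [surviveB, auntOkB, List.all_eq_true, List.mem_filter, and_imp, beq_iff_eq]
  constructor
  · intro h q hq
    have := h q.1 (hsub q hq) q hq rfl
    simpa using this
  · intro h p _ q hq he
    have := h q hq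
    rw [he] at this
    simpa [he] using this

-- the fold of Source B equals the canonical first survivor, under Pre_
lemma part2_alt_eq (aunts : List (Int × List (String × Int))) (h : Pre_part2 aunts) :
    part2_alt aunts = firstMatch aunts := by
  have hused : ∀ p ∈ (usedPropsB aunts : List String), p ∈ knownNames := by
    intro p hp
    simp only [usedPropsB, PySem.Set.mem_ofList, List.mem_flatMap, List.mem_map] at hp
    obtain ⟨a, ha, q, hq, rfl⟩ := hp
    exact h a ha q hq
  have hfilter : aunts.filter
      (fun a => (usedPropsB aunts : List String).all (fun p => auntOkB p (rdVal p) a.2))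
      = aunts.filter (fun a => surviveB a.2) := by
    refine List.filter_congr (fun a ha => ?_)
    refine sweeps_eq_survive _ _ (fun q hq => ?_)
    simp only [usedPropsB, PySem.Set.mem_ofList, List.mem_flatMap, List.mem_map]
    exact ⟨a, ha, q, hq, rfl⟩
  unfold part2_alt firstMatch
  rw [loopB_eq _ _ hused, hfilter]
  cases aunts.filter (fun a => surviveB a.2) <;> rfl

-- ===== VERDICT (by name: the statement is the Claim_ definition above) =====
theorem part2_spec : Claim_equal_part2 := by
  intro aunts _ hpre
  unfold Spec_part2 part2
  rw [loopA_eq aunts hpre, part2_alt_eq aunts hpre]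
  rfl
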